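-- pv_equiv track=rewrite | github.com/gbelbe/ster | ster/nav_logic.py | _count_class_descendants
-- ===== SOURCE A (Python) =====
-- def _count_class_descendants(
--     children_of: dict[str, list[str]],
--     uri: str,
--     individuals_of: dict[str, list[str]] | None = None,
-- ) -> int:
--     """Count all reachable OWL class descendants + their individuals (cycle-safe)."""
--     seen: set[str] = set()
--
--     def _count(u: str) -> int:
--         if u in seen:
--             return 0
--         seen.add(u)
--         kids = children_of.get(u, [])
--         ind_count = len(individuals_of.get(u, [])) if individuals_of else 0
--         return len(kids) + ind_count + sum(_count(k) for k in kids)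
--
--     return _count(uri)
-- ===== SOURCE B (Python) =====
-- def _count_class_descendants(
--     children_of: dict[str, list[str]],
--     uri: str,
--     individuals_of: dict[str, list[str]] | None = None,
-- ) -> int:
--     """Iterative DFS with an explicit stack (no recursion, cycle-safe)."""
--     seen: set[str] = set()
--     total = 0
--     stack = [uri]
--     while stack:
--         u = stack.pop()
--         if u in seen:
--             continue
--         seen.add(u)
--         kids = children_of.get(u, [])
--         total += len(kids) + (len(individuals_of.get(u, [])) if individuals_of else 0)
--         stack.extend(reversed(kids))
--     return total
-- ===== Notes on version B (the rewrite author's own statement) =====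
-- stated objective: idiomatic
-- what changed: A's recursive inner closure (mutating a shared seen set, summing recursive calls over a generator) is replaced by an iterative depth-first traversal with an explicit stack and a running total accumulator, avoiding Python recursion entirely.
import Mathlib
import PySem

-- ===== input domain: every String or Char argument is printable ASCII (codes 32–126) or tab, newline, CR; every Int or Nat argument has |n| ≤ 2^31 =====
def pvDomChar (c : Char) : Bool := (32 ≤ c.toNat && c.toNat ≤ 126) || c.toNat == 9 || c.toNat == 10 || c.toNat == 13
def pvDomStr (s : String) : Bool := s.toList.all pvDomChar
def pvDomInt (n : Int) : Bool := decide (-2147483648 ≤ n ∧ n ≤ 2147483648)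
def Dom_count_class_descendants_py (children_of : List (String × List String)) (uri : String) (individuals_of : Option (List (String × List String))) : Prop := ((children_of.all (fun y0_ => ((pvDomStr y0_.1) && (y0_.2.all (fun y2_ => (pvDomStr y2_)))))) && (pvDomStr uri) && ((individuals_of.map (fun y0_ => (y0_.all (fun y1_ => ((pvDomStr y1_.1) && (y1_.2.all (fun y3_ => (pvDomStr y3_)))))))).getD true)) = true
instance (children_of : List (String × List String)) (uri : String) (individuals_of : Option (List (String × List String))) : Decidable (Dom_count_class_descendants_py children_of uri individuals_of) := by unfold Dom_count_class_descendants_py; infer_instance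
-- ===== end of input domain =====

-- B replaces A's recursive DFS closure by an iterative explicit-stack DFS with a running total (alternative decomposition, no recursion).

-- ===== PORT A =====
-- per-node contribution: len(kids) + (len(individuals_of.get(u, [])) if individuals_of else 0)
def pvWeight (cd : PySem.Dict String (List String)) (iv : Option (List (String × List String))) (u : String) : Int :=
  ((cd.getD u []).length : Int) +
    match iv with
    | none => 0
    | some l =>
        let d := PySem.Dict.ofList l
        if d.items.isEmpty then 0 else ((d.getD u []).length : Int)

-- A's inner recursive `_count`, with the mutable `seen` threaded through; fuel only guards termination
def pvCountA (cd : PySem.Dict String (List String)) (w : String → Int) :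
    Nat → PySem.Set String → String → PySem.Set String × Int
  | 0, seen, _ => (seen, 0)
  | fuel+1, seen, u =>
      if PySem.Set.contains seen u then (seen, 0)
      else
        let seen' := PySem.Set.add seen u
        let kids := cd.getD u []
        let p := kids.foldl (fun q k =>
            let r := pvCountA cd w fuel q.1 k
            (r.1, q.2 + r.2)) (seen', (0 : Int))
        (p.1, w u + p.2)

def count_class_descendants_py (children_of : List (String × List String)) (uri : String) (individuals_of : Option (List (String × List String))) : Int :=
  let cd := PySem.Dict.ofList children_of
  (pvCountA cd (pvWeight cd individuals_of) (children_of.length + 1) PySem.Set.empty uri).2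

-- ===== PORT B =====
-- the while-loop over the explicit stack (Lean list head = Python list end); fuel only guards termination
def pvLoopB (cd : PySem.Dict String (List String)) (w : String → Int) :
    Nat → PySem.Set String → Int → List String → Int
  | 0, _, total, _ => total
  | _+1, _, total, [] => total
  | fuel+1, seen, total, u :: rest =>
      if PySem.Set.contains seen u then pvLoopB cd w fuel seen total rest
      else pvLoopB cd w fuel (PySem.Set.add seen u) (total + w u) (cd.getD u [] ++ rest)

def count_class_descendants_py_alt (children_of : List (String × List String)) (uri : String) (individuals_of : Option (List (String × List String))) : Int :=
  let cd := PySem.Dict.ofList children_of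
  pvLoopB cd (pvWeight cd individuals_of)
    ((cd.items.map (fun p => 1 + p.2.length)).sum + 1) PySem.Set.empty 0 [uri]

-- ===== PRECONDITION & SPEC =====
def Spec_count_class_descendants_py (children_of : List (String × List String)) (uri : String) (individuals_of : Option (List (String × List String))) (out : Int) : Prop := out = count_class_descendants_py_alt children_of uri individuals_of
instance (children_of : List (String × List String)) (uri : String) (individuals_of : Option (List (String × List String))) (out : Int) : Decidable (Spec_count_class_descendants_py children_of uri individuals_of out) := by unfold Spec_count_class_descendants_py; infer_instance

-- ===== CLAIM (what is proved, stated in full; the proofs are below) =====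
def Claim_equal_count_class_descendants_py : Prop := ∀ (children_of : List (String × List String)) (uri : String) (individuals_of : Option (List (String × List String))), Dom_count_class_descendants_py children_of uri individuals_of → Spec_count_class_descendants_py children_of uri individuals_of (count_class_descendants_py children_of uri individuals_of)

-- ===== LEMMAS AND PROOFS =====

-- proof-side machinery: the not-yet-seen keys, a fuel bound, and a reference linearized DFS pvGo/pvG
def pvUnseen (cd : PySem.Dict String (List String)) (seen : PySem.Set String) : List String :=
  cd.keys.filter (fun k => !PySem.Set.contains seen k)

def pvKeyW (cd : PySem.Dict String (List String)) (k : String) : Nat := 1 + (cd.getD k []).length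

def pvBound (cd : PySem.Dict String (List String)) (seen : PySem.Set String) : Nat :=
  ((pvUnseen cd seen).map (pvKeyW cd)).sum

-- linearized DFS: A's recursion flattened = B's loop without its accumulator
def pvGo (cd : PySem.Dict String (List String)) (w : String → Int) :
    Nat → PySem.Set String → List String → PySem.Set String × Int
  | 0, seen, _ => (seen, 0)
  | _+1, seen, [] => (seen, 0)
  | fuel+1, seen, u :: rest =>
      if PySem.Set.contains seen u then pvGo cd w fuel seen rest
      else
        let q := pvGo cd w fuel (PySem.Set.add seen u) (cd.getD u [] ++ rest)
        (q.1, w u + q.2)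

def pvG (cd : PySem.Dict String (List String)) (w : String → Int)
    (seen : PySem.Set String) (L : List String) : PySem.Set String × Int :=
  pvGo cd w (pvBound cd seen + L.length) seen L

theorem pvContains_false (s : PySem.Set String) (u : String) (h : u ∉ s) :
    PySem.Set.contains s u = false := by
  cases hc : PySem.Set.contains s u
  · rfl
  · exact absurd ((PySem.Set.contains_iff s u).mp hc) h

theorem pvLoopB_eq_go (cd : PySem.Dict String (List String)) (w : String → Int) :
    ∀ (fuel : Nat) (seen : PySem.Set String) (total : Int) (L : List String),
      pvLoopB cd w fuel seen total L = total + (pvGo cd w fuel seen L).2 := by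
  intro fuel
  induction fuel with
  | zero => intro seen total L; simp [pvLoopB, pvGo]
  | succ f ih =>
    intro seen total L
    cases L with
    | nil => simp [pvLoopB, pvGo]
    | cons u rest =>
      by_cases h : u ∈ seen
      · simp [pvLoopB, pvGo, h, ih]
      · simp [pvLoopB, pvGo, h, ih, add_assoc]

theorem mem_pvGo_seen (cd : PySem.Dict String (List String)) (w : String → Int) :
    ∀ (fuel : Nat) (seen : PySem.Set String) (L : List String) (x : String),
      x ∈ seen → x ∈ (pvGo cd w fuel seen L).1 := by
  intro fuel
  induction fuel with
  | zero => intro seen L x hx; simpa [pvGo] using hx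
  | succ f ih =>
    intro seen L x hx
    cases L with
    | nil => simpa [pvGo] using hx
    | cons u rest =>
      by_cases h : u ∈ seen
      · simpa [pvGo, h] using ih seen rest x hx
      · simp only [pvGo, pvContains_false seen u h, if_neg Bool.false_ne_true]
        exact ih _ _ x ((PySem.Set.mem_add seen u x).mpr (Or.inl hx))

theorem pvUnseen_sublist (cd : PySem.Dict String (List String))
    (s t : PySem.Set String) (h : ∀ x, x ∈ s → x ∈ t) :
    (pvUnseen cd t).Sublist (pvUnseen cd s) := by
  apply List.monotone_filter_right
  intro a ha
  rw [Bool.not_eq_true'] at ha ⊢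
  cases hsa : PySem.Set.contains s a
  · rfl
  · exfalso
    have hat : a ∈ t := h a ((PySem.Set.contains_iff s a).mp hsa)
    rw [(PySem.Set.contains_iff t a).mpr hat] at ha
    simp at ha

theorem pvUnseen_len_antitone (cd : PySem.Dict String (List String))
    (s t : PySem.Set String) (h : ∀ x, x ∈ s → x ∈ t) :
    (pvUnseen cd t).length ≤ (pvUnseen cd s).length :=
  (pvUnseen_sublist cd s t h).length_le

theorem pvUnseen_add_key (cd : PySem.Dict String (List String))
    (seen : PySem.Set String) (u : String) :
    pvUnseen cd (PySem.Set.add seen u) = (pvUnseen cd seen).filter (fun k => !(k == u)) := by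
  unfold pvUnseen
  rw [List.filter_filter]
  apply List.filter_congr
  intro x _
  by_cases hxu : x = u
  · subst hxu
    simp
  · by_cases hxs : x ∈ seen <;> simp [hxu, hxs]

theorem pvUnseen_perm (cd : PySem.Dict String (List String))
    (hk : cd.keys.Nodup) (seen : PySem.Set String) (u : String)
    (hu : u ∈ cd.keys) (hns : u ∉ seen) :
    List.Perm (pvUnseen cd seen) (u :: pvUnseen cd (PySem.Set.add seen u)) := by
  have hmem : u ∈ pvUnseen cd seen := by
    apply List.mem_filter_of_mem hu
    rw [Bool.not_eq_true']
    exact pvContains_false seen u hns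
  have hnd : (pvUnseen cd seen).Nodup := hk.filter _
  have herase : (pvUnseen cd seen).erase u = pvUnseen cd (PySem.Set.add seen u) := by
    rw [hnd.erase_eq_filter, pvUnseen_add_key]
    apply List.filter_congr
    intro x _
    simp [bne]
  rw [← herase]
  exact List.perm_cons_erase hmem

theorem pvUnseen_add_not_key (cd : PySem.Dict String (List String))
    (seen : PySem.Set String) (u : String) (hu : u ∉ cd.keys) :
    pvUnseen cd (PySem.Set.add seen u) = pvUnseen cd seen := by
  rw [pvUnseen_add_key]
  apply List.filter_eq_self.mpr
  intro x hx
  have hxu : x ≠ u := by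
    intro h
    exact hu (h ▸ (List.mem_filter.mp hx).1)
  simp [hxu]

theorem pvGetD_not_key (cd : PySem.Dict String (List String)) (u : String) (hu : u ∉ cd.keys) :
    cd.getD u [] = [] := by
  apply PySem.Dict.getD_of_not_contains
  rw [← Bool.not_eq_true, PySem.Dict.contains_iff_mem_keys]
  exact hu

theorem pvBound_step (cd : PySem.Dict String (List String)) (hk : cd.keys.Nodup)
    (seen : PySem.Set String) (u : String) (hns : u ∉ seen) :
    pvBound cd (PySem.Set.add seen u) + (cd.getD u []).length ≤ pvBound cd seen := by
  by_cases hu : u ∈ cd.keys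
  · have hsum := ((pvUnseen_perm cd hk seen u hu hns).map (pvKeyW cd)).sum_eq
    unfold pvBound
    rw [hsum]
    simp [pvKeyW]
    omega
  · rw [pvGetD_not_key cd u hu]
    unfold pvBound
    rw [pvUnseen_add_not_key cd seen u hu]
    simp

theorem pvGo_stable (cd : PySem.Dict String (List String)) (hk : cd.keys.Nodup) (w : String → Int) :
    ∀ (fuel : Nat) (seen : PySem.Set String) (L : List String),
      pvBound cd seen + L.length ≤ fuel →
      pvGo cd w (fuel+1) seen L = pvGo cd w fuel seen L := by
  intro fuel
  induction fuel with
  | zero =>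
    intro seen L h
    have hL : L = [] := by
      cases L with
      | nil => rfl
      | cons a as => simp at h
    subst hL
    simp [pvGo]
  | succ f ih =>
    intro seen L h
    cases L with
    | nil => simp [pvGo]
    | cons u rest =>
      by_cases hc : u ∈ seen
      · have hct := (PySem.Set.contains_iff seen u).mpr hc
        simp only [pvGo, hct, if_pos]
        exact ih seen rest (by simp at h; omega)
      · have hcf := pvContains_false seen u hc
        simp only [pvGo, hcf, if_neg Bool.false_ne_true]
        have hstep := pvBound_step cd hk seen u hc
        have hle : pvBound cd (PySem.Set.add seen u) + (cd.getD u [] ++ rest).length ≤ f := by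
          simp only [List.length_append]
          simp at h
          omega
        rw [ih _ _ hle]

theorem pvGo_eq_pvG (cd : PySem.Dict String (List String)) (hk : cd.keys.Nodup) (w : String → Int)
    (fuel : Nat) (seen : PySem.Set String) (L : List String)
    (h : pvBound cd seen + L.length ≤ fuel) :
    pvGo cd w fuel seen L = pvG cd w seen L := by
  induction fuel, h using Nat.le_induction with
  | base => rfl
  | succ f hf ihf => rw [pvGo_stable cd hk w f seen L hf, ihf]

theorem pvG_nil (cd : PySem.Dict String (List String)) (w : String → Int) (seen : PySem.Set String) :
    pvG cd w seen [] = (seen, 0) := by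
  unfold pvG
  cases h : pvBound cd seen + [].length <;> simp [pvGo]

theorem pvG_cons_seen (cd : PySem.Dict String (List String)) (w : String → Int)
    (seen : PySem.Set String) (u : String) (rest : List String)
    (h : u ∈ seen) :
    pvG cd w seen (u :: rest) = pvG cd w seen rest := by
  unfold pvG
  simp only [List.length_cons]
  rw [show pvBound cd seen + (rest.length + 1) = (pvBound cd seen + rest.length) + 1 by omega]
  simp only [pvGo, (PySem.Set.contains_iff seen u).mpr h, if_pos]

theorem pvG_cons_new (cd : PySem.Dict String (List String)) (hk : cd.keys.Nodup) (w : String → Int)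
    (seen : PySem.Set String) (u : String) (rest : List String)
    (h : u ∉ seen) :
    pvG cd w seen (u :: rest) =
      ((pvG cd w (PySem.Set.add seen u) (cd.getD u [] ++ rest)).1,
        w u + (pvG cd w (PySem.Set.add seen u) (cd.getD u [] ++ rest)).2) := by
  conv_lhs => unfold pvG
  simp only [List.length_cons]
  rw [show pvBound cd seen + (rest.length + 1) = (pvBound cd seen + rest.length) + 1 by omega]
  simp only [pvGo, pvContains_false seen u h, if_neg Bool.false_ne_true]
  have hle : pvBound cd (PySem.Set.add seen u) + (cd.getD u [] ++ rest).length ≤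
      pvBound cd seen + rest.length := by
    have := pvBound_step cd hk seen u h
    simp only [List.length_append]
    omega
  rw [pvGo_eq_pvG cd hk w _ _ _ hle]

theorem mem_pvG_seen (cd : PySem.Dict String (List String)) (w : String → Int)
    (seen : PySem.Set String) (L : List String) (x : String) (h : x ∈ seen) :
    x ∈ (pvG cd w seen L).1 :=
  mem_pvGo_seen cd w _ seen L x h

theorem pvG_split (cd : PySem.Dict String (List String)) (hk : cd.keys.Nodup) (w : String → Int) :
    ∀ (seen : PySem.Set String) (L1 L2 : List String),
      pvG cd w seen (L1 ++ L2) =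
        ((pvG cd w (pvG cd w seen L1).1 L2).1,
          (pvG cd w seen L1).2 + (pvG cd w (pvG cd w seen L1).1 L2).2) := by
  have key : ∀ (n : Nat) (seen : PySem.Set String) (L1 L2 : List String),
      pvBound cd seen + L1.length ≤ n →
      pvG cd w seen (L1 ++ L2) =
        ((pvG cd w (pvG cd w seen L1).1 L2).1,
          (pvG cd w seen L1).2 + (pvG cd w (pvG cd w seen L1).1 L2).2) := by
    intro n
    induction n with
    | zero =>
      intro seen L1 L2 h
      have hL : L1 = [] := by
        cases L1 with
        | nil => rfl
        | cons a as => simp at h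
      subst hL
      simp [pvG_nil]
    | succ n ih =>
      intro seen L1 L2 h
      cases L1 with
      | nil => simp [pvG_nil]
      | cons u rest =>
        by_cases hc : u ∈ seen
        · simp only [List.cons_append]
          rw [pvG_cons_seen cd w seen u _ hc, pvG_cons_seen cd w seen u rest hc]
          exact ih seen rest L2 (by simp at h; omega)
        · simp only [List.cons_append]
          rw [pvG_cons_new cd hk w seen u (rest ++ L2) hc, pvG_cons_new cd hk w seen u rest hc]
          rw [show cd.getD u [] ++ (rest ++ L2) = (cd.getD u [] ++ rest) ++ L2 by simp]
          have hle : pvBound cd (PySem.Set.add seen u) + (cd.getD u [] ++ rest).length ≤ n := by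
            have := pvBound_step cd hk seen u hc
            simp only [List.length_append]
            simp at h
            omega
          rw [ih _ _ L2 hle]
          simp [add_assoc]
  intro seen L1 L2
  exact key (pvBound cd seen + L1.length) seen L1 L2 le_rfl

theorem pvCountA_eq_pvG (cd : PySem.Dict String (List String)) (hk : cd.keys.Nodup) (w : String → Int) :
    ∀ (fuel : Nat) (seen : PySem.Set String) (u : String),
      (pvUnseen cd seen).length + 1 ≤ fuel →
      pvCountA cd w fuel seen u = pvG cd w seen [u] := by
  intro fuel
  induction fuel with
  | zero => intro seen u h; omega
  | succ f ih =>
    intro seen u h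
    by_cases hc : u ∈ seen
    · rw [pvG_cons_seen cd w seen u [] hc, pvG_nil]
      simp [pvCountA, hc]
    · rw [pvG_cons_new cd hk w seen u [] hc]
      by_cases hu : u ∈ cd.keys
      · -- u is an unseen key: the unseen-key count strictly decreases
        have hdec : (pvUnseen cd (PySem.Set.add seen u)).length + 1 = (pvUnseen cd seen).length := by
          have := (pvUnseen_perm cd hk seen u hu hc).length_eq
          simp at this
          omega
        have hf : (pvUnseen cd (PySem.Set.add seen u)).length + 1 ≤ f := by omega
        have fold : ∀ (ks : List String) (s : PySem.Set String) (acc : Int),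
            (∀ x, x ∈ PySem.Set.add seen u → x ∈ s) →
            ks.foldl (fun q k =>
                let r := pvCountA cd w f q.1 k
                (r.1, q.2 + r.2)) (s, acc)
              = ((pvG cd w s ks).1, acc + (pvG cd w s ks).2) := by
          intro ks
          induction ks with
          | nil => intro s acc _; simp [pvG_nil]
          | cons k ks ihk =>
            intro s acc hsub
            have hs : (pvUnseen cd s).length + 1 ≤ f := by
              have := pvUnseen_len_antitone cd (PySem.Set.add seen u) s hsub
              omega
            simp only [List.foldl_cons]
            rw [ih s k hs]
            have hsub2 : ∀ x, x ∈ PySem.Set.add seen u → x ∈ (pvG cd w s [k]).1 :=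
              fun x hx => mem_pvG_seen cd w s [k] x (hsub x hx)
            rw [ihk _ _ hsub2]
            have hsplit := pvG_split cd hk w s [k] ks
            simp only [List.singleton_append] at hsplit
            rw [hsplit]
            simp [add_assoc]
        have heq := fold (cd.getD u []) (PySem.Set.add seen u) 0 (fun _ hx => hx)
        have hcf := pvContains_false seen u hc
        simp only [pvCountA, hcf, if_neg Bool.false_ne_true]
        rw [heq]
        simp
      · -- u is not a key: no children, no recursive calls
        have hkd := pvGetD_not_key cd u hu
        have hcf := pvContains_false seen u hc
        simp only [pvCountA, hcf, if_neg Bool.false_ne_true, hkd]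
        simp [pvG_nil]

-- ===== VERDICT (by name: the statement is the Claim_ definition above) =====
theorem count_class_descendants_py_spec : Claim_equal_count_class_descendants_py := by
  intro children_of uri individuals_of _dom
  unfold Spec_count_class_descendants_py count_class_descendants_py count_class_descendants_py_alt
  have hk := PySem.Dict.nodup_keys_ofList children_of
  show (pvCountA (PySem.Dict.ofList children_of)
        (pvWeight (PySem.Dict.ofList children_of) individuals_of)
        (children_of.length + 1) PySem.Set.empty uri).2 =
      pvLoopB (PySem.Dict.ofList children_of)
        (pvWeight (PySem.Dict.ofList children_of) individuals_of)
        (((PySem.Dict.ofList children_of).items.map (fun p => 1 + p.2.length)).sum + 1)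
        PySem.Set.empty 0 [uri]
  have hempty : ∀ x : String, x ∉ (PySem.Set.empty : PySem.Set String) := by
    intro x hx
    simp [PySem.Set.empty] at hx
  have hunseen_empty : pvUnseen (PySem.Dict.ofList children_of) PySem.Set.empty =
      (PySem.Dict.ofList children_of).keys := by
    apply List.filter_eq_self.mpr
    intro x _
    rw [Bool.not_eq_true']
    exact pvContains_false _ x (hempty x)
  have hkeyslen : (PySem.Dict.ofList children_of).keys.length ≤ children_of.length := by
    have h := PySem.Dict.keys_foldl_insert_key children_of (fun p => p.1)
      (fun _ p => p.2) (PySem.Dict.empty (κ := String) (ν := List String))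
    have hkeq : (PySem.Dict.ofList children_of).keys =
        PySem.Set.ofList (children_of.map (fun p => p.1)) := by
      show (children_of.foldl (fun d p => d.insert p.1 p.2) PySem.Dict.empty).keys = _
      rw [h, PySem.Dict.keys_empty, PySem.Set.update_nil_left]
    rw [hkeq]
    calc (PySem.Set.ofList (children_of.map (fun p => p.1))).length
        ≤ (children_of.map (fun p => p.1)).length := PySem.Set.length_ofList_le _
      _ = children_of.length := by simp
  -- A side
  rw [pvCountA_eq_pvG (PySem.Dict.ofList children_of) hk _ (children_of.length + 1)
    PySem.Set.empty uri (by rw [hunseen_empty] at *; omega)]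
  -- B side
  rw [pvLoopB_eq_go]
  have hbound0 : pvBound (PySem.Dict.ofList children_of) PySem.Set.empty + [uri].length ≤
      ((PySem.Dict.ofList children_of).items.map (fun p => 1 + p.2.length)).sum + 1 := by
    have hitems := PySem.Dict.items_eq_map_keys (PySem.Dict.ofList children_of) hk ([] : List String)
    have hsum : ((PySem.Dict.ofList children_of).items.map (fun p => 1 + p.2.length)).sum =
        pvBound (PySem.Dict.ofList children_of) PySem.Set.empty := by
      rw [hitems]
      unfold pvBound
      rw [hunseen_empty, List.map_map]
      rfl
    rw [hsum]
    simp
  rw [pvGo_eq_pvG (PySem.Dict.ofList children_of) hk _ _ _ _ hbound0]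
  simp
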